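-- pv_equiv track=rewrite | github.com/Tchegnoncool/Super-set | Super-Set (Code).py | dealUntilSetExists
-- ===== SOURCE A (Python) =====
-- import copy, string, itertools, random
--
-- def combinations(L, n):
--     return [list(v) for v in itertools.combinations(L, n)]
--
-- def allSame(L):
--     firstVal = L[0]
--     for index in range(1, len(L)):
--         if L[index] != firstVal:
--             return False
--     return True
--
-- def allDiffer(L):
--     prevVal = L[0]
--     for start in range (len(L) - 1):
--         for end in range (start + 1, len(L)):
--             if L[start] == L[end]:
--                 return False
--     return True
--
-- def isSet(cards):
--     lenVal = len(cards[0]) # length of each value in L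
--     for ind in range (lenVal):
--         option = []
--         for val in cards:
--             option.append(val[ind])
--         if not allDiffer(option):
--             if not allSame(option):
--                 return False
--     return True
--
-- def findFirstSet(board, cardsPerSet):
--     possibleSets = combinations(board, cardsPerSet)
--     for candidate in possibleSets:
--         if isSet(candidate):
--             return candidate
--
-- def dealUntilSetExists(deck, cardsPerSet):
--     board = []
--     firstSet = None
--     count = 0
--     while firstSet == None:
--         board.append(deck[count])
--         count += 1
--         if count >= cardsPerSet:
--             firstSet = findFirstSet(board, cardsPerSet)
--     firstSet = sorted(firstSet)
--     return firstSet
-- ===== SOURCE B (Python) =====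
-- import itertools
--
-- def _isSet(cards):
--     return all(len(set(col)) in (1, len(col)) for col in zip(*cards))
--
-- def dealUntilSetExists(deck, cardsPerSet):
--     board = []
--     for card in deck:
--         # only combinations containing the newly dealt card can be new sets
--         for prefix in itertools.combinations(board, cardsPerSet - 1):
--             candidate = list(prefix) + [card]
--             if _isSet(candidate):
--                 return sorted(candidate)
--         board.append(card)
-- ===== Notes on version B (the rewrite author's own statement) =====
-- stated objective: faster
-- what changed: Instead of re-scanning all C(n,k) combinations of the whole board after every deal, B tests only the combinations that contain the newly dealt card (prefixes drawn from combinations(board, k-1) in the same itertools order), which is exact because any set among older cards would already have ended the previous round; the column test is a len(set(col)) check over zip(*cards) instead of A's allSame/allDiffer index loops.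
import Mathlib
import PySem

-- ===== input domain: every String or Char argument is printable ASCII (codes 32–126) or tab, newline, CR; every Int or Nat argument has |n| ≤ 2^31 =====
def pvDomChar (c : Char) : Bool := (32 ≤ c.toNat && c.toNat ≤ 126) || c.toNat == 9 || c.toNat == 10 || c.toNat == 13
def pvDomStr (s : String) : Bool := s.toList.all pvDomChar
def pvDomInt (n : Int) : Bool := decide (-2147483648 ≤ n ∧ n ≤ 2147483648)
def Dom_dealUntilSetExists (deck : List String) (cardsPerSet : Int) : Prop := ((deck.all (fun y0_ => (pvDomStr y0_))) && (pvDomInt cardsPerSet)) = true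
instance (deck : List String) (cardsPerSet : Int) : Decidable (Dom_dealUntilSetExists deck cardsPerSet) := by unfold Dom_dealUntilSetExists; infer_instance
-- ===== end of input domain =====

-- B replaces A's full re-scan of all C(n,k) board combinations after every deal by an
-- incremental scan of only the combinations containing the newly dealt card (same deal order).

-- ===== PORT A =====
-- combinations(L, n) is itertools.combinations as lists: PySem.List.combinations (used by both ports).

-- allSame(L). L[index] / L[0]: in-range here (Python raises on L = []; such calls lie outside Pre_).
def allSame (L : List Char) : Bool :=
  (List.range' 1 (L.length - 1)).all (fun i => L.getD i default == L.headD default)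

-- allDiffer(L): the double loop over pairs (start, end).
def allDiffer (L : List Char) : Bool :=
  (List.range (L.length - 1)).all (fun s =>
    (List.range' (s + 1) (L.length - (s + 1))).all (fun e =>
      !(L.getD s default == L.getD e default)))

-- isSet(cards). val[ind] is ported as toList.getD ind default: exact for ind < len(val); Python
-- raises IndexError where ind ≥ len(val), and Pre_ excludes runs that reach such a read.
def isSetA (cards : List String) : Bool :=
  (List.range (cards.headD "").toList.length).all (fun ind =>
    let option := cards.map (fun v => v.toList.getD ind default)
    allDiffer option || allSame option)

-- findFirstSet(board, cardsPerSet): first set in itertools order (None if absent).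
def findFirstSet (board : List String) (k : Nat) : Option (List String) :=
  (PySem.List.combinations board k).find? isSetA

-- the while loop: board grows by deck[count]; search once count >= cardsPerSet.
def dealLoopA (cardsPerSet : Int) (board : List String) : List String → Option (List String)
  | [] => none            -- deck exhausted: Python raises IndexError at deck[count] (outside Pre_)
  | c :: rest =>
    let board' := board ++ [c]
    if cardsPerSet ≤ (board'.length : Int) then
      match findFirstSet board' cardsPerSet.toNat with
      | some s => some s
      | none => dealLoopA cardsPerSet board' rest
    else dealLoopA cardsPerSet board' rest

def dealUntilSetExists (deck : List String) (cardsPerSet : Int) : List String :=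
  match dealLoopA cardsPerSet [] deck with
  | some s => PySem.List.sorted s (fun x => x) false
  | none => []            -- unreachable under Pre_ (Python raises IndexError)

-- ===== PORT B =====
-- _isSet(cards): every column of zip(*cards) (columns i < min card length) has 1 or len(col) distinct values.
def minLenB (cards : List String) : Nat := ((cards.map (fun s => s.toList.length)).min?).getD 0

def isSetB (cards : List String) : Bool :=
  (List.range (minLenB cards)).all (fun i =>
    let col := cards.map (fun s => s.toList.getD i default)
    PySem.Set.len (PySem.Set.ofList col) == 1 ||
      PySem.Set.len (PySem.Set.ofList col) == (col.length : Int))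

-- the for loop: scan only candidates prefix + [card] with prefix from combinations(board, k-1).
def dealLoopB (cardsPerSet : Int) (board : List String) : List String → Option (List String)
  | [] => none            -- Source B falls through and returns None here (outside Pre_)
  | c :: rest =>
    match (PySem.List.combinations board (cardsPerSet - 1).toNat).find?
        (fun s => isSetB (s ++ [c])) with
    | some s => some (s ++ [c])
    | none => dealLoopB cardsPerSet (board ++ [c]) rest

def dealUntilSetExists_alt (deck : List String) (cardsPerSet : Int) : List String :=
  match dealLoopB cardsPerSet [] deck with
  | some s => PySem.List.sorted s (fun x => x) false
  | none => []            -- unreachable under Pre_ (Source B returns None)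

-- ===== PRECONDITION & SPEC =====
-- Spec-level vocabulary (ports are not referenced).
def pvMinLen (cards : List String) : Nat := ((cards.map (fun s => s.toList.length)).min?).getD 0
def pvCol (cards : List String) (i : Nat) : List Char := cards.map (fun s => s.toList.getD i default)
-- a column is admissible when it carries one distinct value or all-distinct values
def pvColPasses (col : List Char) : Prop :=
  PySem.Set.len (PySem.Set.ofList col) = 1 ∨ PySem.Set.len (PySem.Set.ofList col) = (col.length : Int)
def pvPasses (cards : List String) : Prop := ∀ i ∈ List.range (pvMinLen cards), pvColPasses (pvCol cards i)
-- "full": the first card is no longer than every other card, so A's isSet reads no index out of range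
def pvFull (cards : List String) : Prop := pvMinLen cards = (cards.headD "").toList.length
-- all candidate sets in deal order: when card j is dealt, the new candidates are
-- (k-1)-combinations of the earlier cards followed by card j, in itertools order
def pvCands (board rest : List String) (r : Nat) : List (List String) :=
  (List.range rest.length).flatMap (fun j =>
    (PySem.List.combinations (board ++ rest.take j) r).map (fun s => s ++ [rest.getD j ""]))
-- the first candidate (in deal order) all of whose columns are admissible exists and is full
def pvWins (board rest : List String) (r : Nat) : Prop :=
  ∃ i ∈ List.range (pvCands board rest r).length,
    pvPasses ((pvCands board rest r).getD i []) ∧ pvFull ((pvCands board rest r).getD i []) ∧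
    ∀ j ∈ List.range i, ¬ pvPasses ((pvCands board rest r).getD j [])

-- Pre_ = exactly the inputs on which Python A returns normally: cardsPerSet ≥ 1 and the first
-- candidate set in deal order whose columns all pass the Set test is read without an IndexError
-- (on other inputs A raises ValueError / IndexError — dealing past the deck or indexing past a card).
def Pre_dealUntilSetExists (deck : List String) (cardsPerSet : Int) : Prop :=
  1 ≤ cardsPerSet ∧ pvWins [] deck (cardsPerSet.toNat - 1)
instance (deck : List String) (cardsPerSet : Int) : Decidable (Pre_dealUntilSetExists deck cardsPerSet) := by
  unfold Pre_dealUntilSetExists pvWins pvPasses pvFull pvColPasses; infer_instance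

def pvWitness_dealUntilSetExists : List String × Int := (["ab", "cb", "db"], 3)

def Spec_dealUntilSetExists (deck : List String) (cardsPerSet : Int) (out : List String) : Prop := out = dealUntilSetExists_alt deck cardsPerSet
instance (deck : List String) (cardsPerSet : Int) (out : List String) : Decidable (Spec_dealUntilSetExists deck cardsPerSet out) := by unfold Spec_dealUntilSetExists; infer_instance

-- ===== CLAIM (what is proved, stated in full; the proofs are below) =====
def Claim_equal_dealUntilSetExists : Prop := ∀ (deck : List String) (cardsPerSet : Int), Dom_dealUntilSetExists deck cardsPerSet → Pre_dealUntilSetExists deck cardsPerSet → Spec_dealUntilSetExists deck cardsPerSet (dealUntilSetExists deck cardsPerSet)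

-- ===== LEMMAS AND PROOFS =====

-- column bridges -------------------------------------------------------------
theorem pv_allSame_iff (col : List Char) : allSame col = true ↔ ∀ a ∈ col, a = col.headD default := by
  cases col with
  | nil => simp [allSame]
  | cons x t =>
    simp only [allSame, List.all_eq_true, List.mem_range'_1, List.headD_cons, beq_iff_eq,
      List.length_cons, Nat.add_sub_cancel]
    constructor
    · intro h a ha
      rcases List.mem_iff_getElem.mp ha with ⟨n, hn, rfl⟩
      cases n with
      | zero => simp
      | succ m =>
        have hm := h (m + 1) ⟨by omega, by simp at hn; omega⟩
        rw [List.getD_eq_getElem _ _ hn] at hm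
        exact hm
    · intro h i hi
      have hlt : i < (x :: t).length := by simp; omega
      rw [List.getD_eq_getElem _ _ hlt]
      exact h _ (List.getElem_mem hlt)


theorem pv_allDiffer_iff (col : List Char) : allDiffer col = true ↔ col.Nodup := by
  simp only [allDiffer, List.all_eq_true, List.mem_range, List.mem_range'_1,
    Bool.not_eq_eq_eq_not, Bool.not_true, beq_eq_false_iff_ne, ne_eq]
  constructor
  · intro h
    exact List.pairwise_iff_getElem.mpr (fun i j hi hj hij => by
      have hh := h i (by omega) j ⟨by omega, by omega⟩
      rw [List.getD_eq_getElem _ _ hi, List.getD_eq_getElem _ _ hj] at hh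
      exact hh)
  · intro h i hi j hj
    have hjl : j < col.length := by omega
    have hil : i < col.length := by omega
    rw [List.getD_eq_getElem _ _ hil, List.getD_eq_getElem _ _ hjl]
    exact List.pairwise_iff_getElem.mp h i j hil hjl (by omega)


theorem pv_setlen_len_iff (col : List Char) :
    PySem.Set.len (PySem.Set.ofList col) = (col.length : Int) ↔ col.Nodup := by
  have hperm : (PySem.Set.ofList col).Perm col.dedup :=
    (List.perm_ext_iff_of_nodup (PySem.Set.nodup_ofList col) col.nodup_dedup).mpr
      (fun a => by rw [PySem.Set.mem_ofList, List.mem_dedup])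
  simp only [PySem.Set.len, hperm.length_eq, Nat.cast_inj]
  constructor
  · intro h
    exact List.dedup_eq_self.mp ((List.dedup_sublist col).eq_of_length h)
  · intro h
    rw [List.dedup_eq_self.mpr h]


theorem pv_setlen_one_iff (col : List Char) (hc : col ≠ []) :
    PySem.Set.len (PySem.Set.ofList col) = 1 ↔ ∀ a ∈ col, a = col.headD default := by
  cases col with
  | nil => simp at hc
  | cons x t =>
    simp only [PySem.Set.len, List.headD_cons]
    constructor
    · intro h
      have h1 : (PySem.Set.ofList (x :: t)).length = 1 := by omega
      obtain ⟨a, ha⟩ := List.length_eq_one_iff.mp h1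
      have hx : x ∈ PySem.Set.ofList (x :: t) := (PySem.Set.mem_ofList _ _).mpr (by simp)
      rw [ha] at hx
      simp at hx
      intro b hb
      have hbm : b ∈ PySem.Set.ofList (x :: t) := (PySem.Set.mem_ofList _ _).mpr hb
      rw [ha] at hbm
      simp at hbm
      rw [hbm, hx]
    · intro h
      have hx : x ∈ PySem.Set.ofList (x :: t) := (PySem.Set.mem_ofList _ _).mpr (by simp)
      have hall : ∀ b ∈ PySem.Set.ofList (x :: t), b = x := by
        intro b hb
        exact h b ((PySem.Set.mem_ofList _ _).mp hb)
      have hnd := PySem.Set.nodup_ofList (x :: t)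
      have hsing : PySem.Set.ofList (x :: t) = [x] := by
        cases hS : PySem.Set.ofList (x :: t) with
        | nil => rw [hS] at hx; simp at hx
        | cons y u =>
          rw [hS] at hall hnd
          have hy : y = x := hall y (by simp)
          have hu : u = [] := by
            by_contra hne
            obtain ⟨z, hz⟩ := List.exists_mem_of_ne_nil u hne
            have hzx : z = x := hall z (by simp [hz])
            have hyz : y ≠ z := by
              have hnc := List.nodup_cons.mp hnd
              intro he
              exact hnc.1 (he ▸ hz)
            exact hyz (by rw [hy, hzx])
          rw [hy, hu]
      rw [hsing]
      rfl


theorem pv_colPasses_iff (col : List Char) :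
    (allDiffer col || allSame col) = true ↔ pvColPasses col := by
  by_cases hc : col = []
  · subst hc
    constructor
    · intro _
      right
      rfl
    · intro _
      simp [allDiffer, allSame]
  · rw [Bool.or_eq_true, pv_allDiffer_iff, pv_allSame_iff, pvColPasses,
      pv_setlen_len_iff, pv_setlen_one_iff col hc]
    exact or_comm


-- isSet bridges --------------------------------------------------------------
theorem pv_minLen_le (cards : List String) : pvMinLen cards ≤ (cards.headD "").toList.length := by
  cases cards with
  | nil => simp [pvMinLen]
  | cons x t =>
    simp only [pvMinLen, List.map_cons, List.headD_cons]
    have hne : (x.toList.length :: t.map (fun s => s.toList.length)) ≠ [] := by simp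
    obtain ⟨m, hm⟩ := Option.ne_none_iff_exists'.mp (mt List.min?_eq_none_iff.mp hne)
    rw [hm, Option.getD_some]
    rw [List.min?_eq_some_iff] at hm
    exact hm.2 _ (by simp)


theorem pv_isSetB_iff (cards : List String) : isSetB cards = true ↔ pvPasses cards := by
  simp only [isSetB, pvPasses, List.all_eq_true, Bool.or_eq_true, beq_iff_eq,
    pvColPasses, pvCol, minLenB, pvMinLen]


theorem pv_isSetA_iff (cards : List String) :
    isSetA cards = true ↔ ∀ i ∈ List.range (cards.headD "").toList.length, pvColPasses (pvCol cards i) := by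
  simp only [isSetA, List.all_eq_true]
  constructor
  · intro h i hi
    exact (pv_colPasses_iff _).mp (h i hi)
  · intro h i hi
    exact (pv_colPasses_iff _).mpr (h i hi)


theorem pv_isSetA_false (cards : List String) (h : ¬ pvPasses cards) : isSetA cards = false := by
  cases hA : isSetA cards with
  | false => rfl
  | true =>
    exfalso
    apply h
    intro i hi
    refine (pv_isSetA_iff cards).mp hA i ?_
    rw [List.mem_range] at hi ⊢
    exact lt_of_lt_of_le hi (pv_minLen_le cards)


theorem pv_isSetA_of_full (cards : List String) (hf : pvFull cards) (hp : pvPasses cards) :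
    isSetA cards = true := by
  rw [pv_isSetA_iff]
  intro i hi
  apply hp
  rw [List.mem_range] at hi ⊢
  rw [pvFull] at hf
  omega


-- find? helpers --------------------------------------------------------------
theorem pv_find?_of_first {α : Type} (d : α) (p : α → Bool) :
    ∀ (l : List α) (i : Nat), i < l.length → p (l.getD i d) = true →
      (∀ j, j < i → p (l.getD j d) = false) → l.find? p = some (l.getD i d) := by
  intro l
  induction l with
  | nil => intro i hi; simp at hi
  | cons x t ih =>
    intro i hi hp hj
    cases i with
    | zero =>
      rw [List.getD_cons_zero] at hp ⊢
      simp [hp]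
    | succ m =>
      have h0 : p x = false := by
        have h00 := hj 0 (by omega)
        rwa [List.getD_cons_zero] at h00
      rw [List.getD_cons_succ] at hp ⊢
      simp only [List.find?_cons, h0]
      exact ih m (by simp at hi; omega) hp
        (fun j hjm => by
          have hjj := hj (j + 1) (by omega)
          rwa [List.getD_cons_succ] at hjj)


-- the incremental step: if no combination of L alone is a set, the first set among the
-- combinations of L ++ [c] is the first set among those ending in c, in matching order
theorem pv_combos_snoc_find? (c : String) (p : List String → Bool) :
    ∀ (k : Nat) (L : List String), (∀ s ∈ PySem.List.combinations L (k + 1), p s = false) →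
      (PySem.List.combinations (L ++ [c]) (k + 1)).find? p
        = ((PySem.List.combinations L k).map (fun s => s ++ [c])).find? p := by
  intro k L
  induction L generalizing p k with
  | nil =>
    intro _h
    cases k with
    | zero =>
      simp [PySem.List.combinations_one, PySem.List.combinations_zero]
    | succ k' =>
      simp [PySem.List.combinations_cons_succ, PySem.List.combinations_nil_succ]
  | cons x xs ih =>
    intro h
    have h1 : ∀ s ∈ PySem.List.combinations xs k, p (x :: s) = false := by
      intro s hs
      apply h
      rw [PySem.List.combinations_cons_succ]
      exact List.mem_append_left _ (List.mem_map_of_mem hs)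
    have h2 : ∀ s ∈ PySem.List.combinations xs (k + 1), p s = false := by
      intro s hs
      apply h
      rw [PySem.List.combinations_cons_succ]
      exact List.mem_append_right _ hs
    cases k with
    | zero =>
      have hx : p [x] = false := h1 [] (by simp [PySem.List.combinations_zero])
      have IH := ih (p := p) (k := 0) h2
      simp only [List.cons_append, PySem.List.combinations_cons_succ,
        PySem.List.combinations_zero, List.map_cons, List.map_nil, List.find?_append,
        List.find?_cons, hx] at IH ⊢
      rw [IH]
      simp
    | succ k' =>
      have IHa := ih (p := fun s => p (x :: s)) (k := k') h1
      have IHb := ih (p := p) (k := k' + 1) h2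
      simp only [List.cons_append, PySem.List.combinations_cons_succ, List.find?_append,
        List.map_append, List.map_map, List.find?_map] at IHa IHb ⊢
      simp only [Function.comp_def, List.cons_append] at IHa IHb ⊢
      rw [IHa, IHb]
      simp [Option.map_map, Function.comp_def]


-- candidate-list structure ---------------------------------------------------
theorem pv_cands_cons (board : List String) (c : String) (rest : List String) (r : Nat) :
    pvCands board (c :: rest) r
      = ((PySem.List.combinations board r).map (fun s => s ++ [c])) ++ pvCands (board ++ [c]) rest r := by
  simp only [pvCands, List.length_cons, List.range_succ_eq_map, List.flatMap_cons,
    List.take_zero, List.append_nil, List.getD_cons_zero, List.flatMap_map]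
  congr 1
  apply List.flatMap_congr
  intro j hj
  simp [List.take_succ_cons, List.append_assoc]


-- main loop equivalence ------------------------------------------------------
theorem pv_loops_eq (k : Int) (hk : 1 ≤ k) :
    ∀ (rest board : List String),
      (∀ s ∈ PySem.List.combinations board k.toNat, isSetA s = false) →
      pvWins board rest (k.toNat - 1) →
      dealLoopA k board rest = dealLoopB k board rest := by
  intro rest
  induction rest with
  | nil =>
    intro board _hA hw
    simp [pvWins, pvCands] at hw
  | cons c tail ih =>
    intro board hA hw
    obtain ⟨i, hi, hpass, hfull, hfirst⟩ := hw
    rw [List.mem_range] at hi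
    rw [pv_cands_cons] at hi hpass hfull hfirst
    set r := k.toNat - 1 with hr
    set S := (PySem.List.combinations board r).map (fun s => s ++ [c]) with hS
    have hk1 : k.toNat = r + 1 := by omega
    have hkm1 : (k - 1).toNat = r := by omega
    have hA' : ∀ s ∈ PySem.List.combinations board (r + 1), isSetA s = false := by
      rw [← hk1]; exact hA
    have hgetS : ∀ j, j < S.length →
        S.getD j [] = (PySem.List.combinations board r).getD j [] ++ [c] := by
      intro j hj
      have hj' : j < (PySem.List.combinations board r).length := by simpa [hS] using hj
      rw [List.getD_eq_getElem _ _ hj, List.getD_eq_getElem _ _ hj']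
      simp only [hS, List.getElem_map]
    rw [List.length_append] at hi
    by_cases hiS : i < S.length
    · -- the winning candidate is dealt with card c: both loops return it now
      have hi' : i < (PySem.List.combinations board r).length := by simpa [hS] using hiS
      have hgetw : (S ++ pvCands (board ++ [c]) tail r).getD i [] = S.getD i [] :=
        List.getD_append _ _ _ _ hiS
      rw [hgetw, hgetS i hiS] at hpass hfull
      have hBp : isSetB ((PySem.List.combinations board r).getD i [] ++ [c]) = true :=
        (pv_isSetB_iff _).mpr hpass
      have hBfalse : ∀ j, j < i →
          isSetB ((PySem.List.combinations board r).getD j [] ++ [c]) = false := by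
        intro j hj
        have hjS : j < S.length := lt_trans hj hiS
        have hnp := hfirst j (List.mem_range.mpr hj)
        rw [List.getD_append _ _ _ _ hjS, hgetS j hjS] at hnp
        cases hB : isSetB ((PySem.List.combinations board r).getD j [] ++ [c]) with
        | false => rfl
        | true => exact absurd ((pv_isSetB_iff _).mp hB) hnp
      have hBfind : (PySem.List.combinations board (k - 1).toNat).find?
          (fun s => isSetB (s ++ [c]))
          = some ((PySem.List.combinations board r).getD i []) := by
        rw [hkm1]
        exact pv_find?_of_first [] _ _ i hi' hBp hBfalse
      have hguard : k ≤ (((board ++ [c]).length : Nat) : Int) := by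
        have hblen : r ≤ board.length := by
          by_contra hlt
          rw [PySem.List.combinations_eq_nil_of_length_lt board (by omega)] at hi'
          simp at hi'
        rw [List.length_append]
        simp only [List.length_cons, List.length_nil]
        omega
      have hAfail : ∀ j, j < i → isSetA (S.getD j []) = false := by
        intro j hj
        have hjS : j < S.length := lt_trans hj hiS
        have hnp := hfirst j (List.mem_range.mpr hj)
        rw [List.getD_append _ _ _ _ hjS] at hnp
        exact pv_isSetA_false _ hnp
      have hAw : isSetA (S.getD i []) = true := by
        rw [hgetS i hiS]
        exact pv_isSetA_of_full _ hfull hpass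
      have hAfind : findFirstSet (board ++ [c]) k.toNat = some (S.getD i []) := by
        rw [findFirstSet, hk1, pv_combos_snoc_find? c isSetA r board hA']
        exact pv_find?_of_first [] _ _ i hiS hAw hAfail
      simp only [dealLoopA, dealLoopB, hBfind, hAfind, if_pos hguard]
      rw [hgetS i hiS]
    · -- no new candidate wins: both loops recurse with board ++ [c]
      rw [not_lt] at hiS
      have hSfail : ∀ j, j < S.length → ¬ pvPasses (S.getD j []) := by
        intro j hj
        have hnp := hfirst j (List.mem_range.mpr (lt_of_lt_of_le hj hiS))
        rwa [List.getD_append _ _ _ _ hj] at hnp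
      have hBnone : (PySem.List.combinations board (k - 1).toNat).find?
          (fun s => isSetB (s ++ [c])) = none := by
        rw [hkm1, List.find?_eq_none]
        intro s hs
        rcases List.mem_iff_getElem.mp hs with ⟨j, hjl, rfl⟩
        have hjS : j < S.length := by simpa [hS] using hjl
        have hnp := hSfail j hjS
        rw [hgetS j hjS, List.getD_eq_getElem _ _ hjl] at hnp
        intro hb
        exact hnp ((pv_isSetB_iff _).mp hb)
      have hAfailS : ∀ s ∈ S, isSetA s = false := by
        intro s hs
        rcases List.mem_iff_getElem.mp hs with ⟨j, hjl, rfl⟩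
        have hnp := hSfail j hjl
        rw [List.getD_eq_getElem _ _ hjl] at hnp
        exact pv_isSetA_false _ hnp
      have hA'' : ∀ s ∈ PySem.List.combinations (board ++ [c]) k.toNat, isSetA s = false := by
        rw [hk1]
        have hnone : (PySem.List.combinations (board ++ [c]) (r + 1)).find? isSetA = none := by
          rw [pv_combos_snoc_find? c isSetA r board hA', List.find?_eq_none]
          intro t ht
          simp only [Bool.not_eq_true]
          exact hAfailS t ht
        intro s hs
        have := List.find?_eq_none.mp hnone s hs
        simpa using this
      have hwin' : pvWins (board ++ [c]) tail r := by
        refine ⟨i - S.length, List.mem_range.mpr (by omega), ?_, ?_, ?_⟩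
        · rw [List.getD_append_right _ _ _ _ hiS] at hpass
          exact hpass
        · rw [List.getD_append_right _ _ _ _ hiS] at hfull
          exact hfull
        · intro j hj
          rw [List.mem_range] at hj
          have hnp := hfirst (S.length + j) (List.mem_range.mpr (by omega))
          rw [List.getD_append_right _ _ _ _ (by omega)] at hnp
          simpa [Nat.add_sub_cancel_left] using hnp
      have hrec := ih (board ++ [c]) hA'' hwin'
      simp only [dealLoopA, dealLoopB, hBnone]
      by_cases hg : k ≤ (((board ++ [c]).length : Nat) : Int)
      · rw [if_pos hg]
        have hAnone : findFirstSet (board ++ [c]) k.toNat = none := by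
          rw [findFirstSet, List.find?_eq_none]
          intro s hs
          simp only [Bool.not_eq_true]
          exact hA'' s hs
        rw [hAnone]
        exact hrec
      · rw [if_neg hg]
        exact hrec


-- ===== VERDICT (by name: the statement is the Claim_ definition above) =====
theorem dealUntilSetExists_spec : Claim_equal_dealUntilSetExists := by
  intro deck k _hdom hpre
  obtain ⟨hk, hw⟩ := hpre
  have hA0 : ∀ s ∈ PySem.List.combinations ([] : List String) k.toNat, isSetA s = false := by
    have hk1 : k.toNat = (k.toNat - 1) + 1 := by omega
    rw [hk1, PySem.List.combinations_nil_succ]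
    intro s hs
    simp at hs
  have h := pv_loops_eq k hk deck [] hA0 hw
  unfold Spec_dealUntilSetExists dealUntilSetExists dealUntilSetExists_alt
  rw [h]
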